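-- pv_equiv track=rewrite | github.com/harshues04/Search-And-Game-Algorithms | Search_algos_implementation.py | bb_he
-- ===== SOURCE A (Python) =====
-- from typing import List,Tuple,Dict, Set
-- from heapq import heappush , heappop
--
-- def bb_he(graph:Dict[str,List[str]],start:str,goal:str,heuristic: Dict[str,int], weights:Dict[Tuple[str], int])->List[str]:
--     pq=[(heuristic[start],0,[start])]
--
--     while pq:
--         _,cost,current_path=heappop(pq)
--         current_node=current_path[-1]
--
--         if current_node==goal:
--             return current_path
--
--         for neighbor in graph.get(current_node,[]):
--             if neighbor not in current_path:
--                 new_path=current_path+[neighbor]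
--                 new_cost=cost+weights.get((current_node, neighbor),0)
--                 estimate=new_cost+heuristic.get(neighbor)
--                 heappush(pq,(estimate, new_cost,new_path))
--     return None
-- ===== SOURCE B (Python) =====
-- def bb_he(graph, start, goal, heuristic, weights):
--     frontier = [(heuristic[start], 0, [start])]
--     while frontier:
--         best = min(frontier)
--         frontier.remove(best)
--         _, cost, path = best
--         node = path[-1]
--         if node == goal:
--             return path
--         frontier.extend(
--             (cost + weights.get((node, nb), 0) + heuristic.get(nb),
--              cost + weights.get((node, nb), 0),
--              path + [nb])
--             for nb in graph.get(node, []) if nb not in path)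
--     return None
-- ===== Notes on version B (the rewrite author's own statement) =====
-- stated objective: simpler
-- what changed: Drops the heapq binary heap: the frontier is a plain unordered list, each iteration selects the minimum entry with min() (full-tuple order, identical to heap order), removes it, and extends the frontier with a comprehension of the filtered neighbor expansions instead of per-neighbor heappushes.
import Mathlib
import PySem

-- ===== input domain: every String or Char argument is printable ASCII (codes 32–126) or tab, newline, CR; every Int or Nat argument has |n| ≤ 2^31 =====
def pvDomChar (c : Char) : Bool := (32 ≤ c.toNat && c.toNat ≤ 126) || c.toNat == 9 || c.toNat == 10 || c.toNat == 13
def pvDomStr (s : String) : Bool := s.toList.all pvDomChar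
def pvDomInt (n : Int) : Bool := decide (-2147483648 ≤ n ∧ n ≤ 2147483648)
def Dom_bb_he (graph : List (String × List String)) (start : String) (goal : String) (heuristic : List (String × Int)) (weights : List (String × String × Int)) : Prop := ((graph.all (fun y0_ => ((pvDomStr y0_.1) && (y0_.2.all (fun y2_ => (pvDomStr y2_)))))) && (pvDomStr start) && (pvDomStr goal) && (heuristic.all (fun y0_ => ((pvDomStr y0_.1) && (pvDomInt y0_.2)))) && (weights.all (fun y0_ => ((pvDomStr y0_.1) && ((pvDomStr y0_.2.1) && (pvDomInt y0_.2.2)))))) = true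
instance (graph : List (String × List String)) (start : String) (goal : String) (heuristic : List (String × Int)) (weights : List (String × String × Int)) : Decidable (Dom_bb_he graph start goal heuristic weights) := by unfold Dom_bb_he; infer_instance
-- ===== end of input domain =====

-- B drops the heapq heap: a plain unordered frontier list, min() full-tuple scan + remove per
-- iteration, and a comprehension extending the frontier; equivalence of the RETURN value.

-- Shared: a frontier entry (estimate, cost, path) and Python's tuple order on it
-- (lexicographic; '<' on List String / String is Python's list/str comparison).
abbrev PVEntry := Int × Int × List String

def pvLt (a b : PVEntry) : Bool :=
  decide (a.1 < b.1 ∨ (a.1 = b.1 ∧ (a.2.1 < b.2.1 ∨ (a.2.1 = b.2.1 ∧ a.2.2 < b.2.2))))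

-- Totality fuel for both loops: simple paths bound the number of iterations; the loops
-- are in fact exhausted long before this fuel is (a pure totality guard, same computation).
def pvFuel (graph : List (String × List String)) : Nat :=
  (graph.map Prod.fst ++ (graph.map Prod.snd).flatten).length + 2

def pvFuelBig (graph : List (String × List String)) : Nat := (pvFuel graph) ^ (pvFuel graph)

-- ===== PORT A =====
-- heappush/heappop are library calls, ported by their value-level semantics on a multiset:
-- heappop returns the minimum tuple (ties are identical values) and removes one occurrence
-- of it; heappush appends. popMin extracts the first minimal element.
def popMin : List PVEntry → Option (PVEntry × List PVEntry)
  | [] => none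
  | e :: es =>
    match popMin es with
    | none => some (e, [])
    | some (m, rest) => if pvLt m e then some (m, e :: rest) else some (e, es)

def pvLoopA (graph : List (String × List String)) (goal : String)
    (heuristic : List (String × Int)) (weights : List (String × String × Int)) :
    Nat → List PVEntry → Option (List String)
  | 0, _ => none
  | fuel + 1, pq =>
    match popMin pq with
    | none => none                      -- while pq: … falls through → return None
    | some ((_est, cost, path), rest) =>
      match PySem.List.pyGet? path (-1) with   -- current_node = current_path[-1]
      | none => none                    -- unreachable guard: paths are never empty
      | some node =>
        if node == goal then some path
        else
          pvLoopA graph goal heuristic weights fuel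
            ((PySem.Dict.getD (PySem.Dict.mk graph) node []).foldl (fun acc nb =>
              if !path.contains nb then
                let newPath := path ++ [nb]
                let newCost := cost + PySem.Dict.getD (PySem.Dict.mk (weights.map (fun w => ((w.1, w.2.1), w.2.2)))) (node, nb) 0
                let est := newCost + PySem.Dict.getD (PySem.Dict.mk heuristic) nb 0  -- heuristic.get(nb): key present under Pre_
                acc ++ [(est, newCost, newPath)]
              else acc) rest)

def bb_he (graph : List (String × List String)) (start : String) (goal : String) (heuristic : List (String × Int)) (weights : List (String × String × Int)) : Option (List String) :=
  match PySem.Dict.get? (PySem.Dict.mk heuristic) start with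
  | none => none                        -- heuristic[start]: KeyError, excluded by Pre_
  | some h0 => pvLoopA graph goal heuristic weights (pvFuelBig graph) [(h0, 0, [start])]

-- ===== PORT B =====
-- min(frontier): foldl keeping the current element unless a strictly smaller one appears
-- (Python min returns the first minimal element).
def pvSelMin (e : PVEntry) (l : List PVEntry) : PVEntry :=
  l.foldl (fun m x => if pvLt x m then x else m) e

-- weights.get((node, nb), 0) and heuristic.get(nb) (the latter total under Pre_)
def pvW (weights : List (String × String × Int)) (node nb : String) : Int :=
  PySem.Dict.getD (PySem.Dict.mk (weights.map (fun w => ((w.1, w.2.1), w.2.2)))) (node, nb) 0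

def pvH (heuristic : List (String × Int)) (nb : String) : Int :=
  PySem.Dict.getD (PySem.Dict.mk heuristic) nb 0

-- one frontier step: best = min, frontier.remove(best) (List.erase: first equal occurrence),
-- path[-1] ported as getLast? (exact for index -1), comprehension = filter + map, extend = ++.
def pvLoopB (graph : List (String × List String)) (goal : String)
    (heuristic : List (String × Int)) (weights : List (String × String × Int)) :
    Nat → List PVEntry → Option (List String)
  | 0, _ => none
  | _ + 1, [] => none
  | fuel + 1, f :: fs =>
    let best := pvSelMin f fs
    let cost := best.2.1
    let path := best.2.2
    match path.getLast? with
    | none => none                      -- unreachable guard: paths are never empty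
    | some node =>
      if node == goal then some path
      else
        pvLoopB graph goal heuristic weights fuel
          (((f :: fs).erase best) ++
            ((PySem.Dict.getD (PySem.Dict.mk graph) node []).filter
              (fun nb => !path.contains nb)).map
              (fun nb => (cost + pvW weights node nb + pvH heuristic nb,
                          cost + pvW weights node nb, path ++ [nb])))

def bb_he_alt (graph : List (String × List String)) (start : String) (goal : String) (heuristic : List (String × Int)) (weights : List (String × String × Int)) : Option (List String) :=
  (PySem.Dict.get? (PySem.Dict.mk heuristic) start).bind (fun h0 =>
    pvLoopB graph goal heuristic weights (pvFuelBig graph) [(h0, 0, [start])])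

-- ===== PRECONDITION & SPEC =====
-- Pre_ excludes inputs where A raises: heuristic missing start (KeyError at the first line) or
-- missing a neighbor listed in graph (TypeError 'int + None' when that neighbor is expanded).
-- When start = goal, or start's adjacency list is empty/absent, no neighbor is ever expanded,
-- so those inputs are re-admitted; Pre_ still overshoots where a listed neighbor is merely
-- unreachable (A then still returns) — see claim cites.
def Pre_bb_he (graph : List (String × List String)) (start : String) (goal : String) (heuristic : List (String × Int)) (weights : List (String × String × Int)) : Prop :=
  (heuristic.map Prod.fst).contains start = true ∧
  (start = goal ∨
   PySem.Dict.getD (PySem.Dict.mk graph) start [] = [] ∨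
   graph.all (fun p => p.2.all (fun nb => (heuristic.map Prod.fst).contains nb)) = true)
instance (graph : List (String × List String)) (start : String) (goal : String) (heuristic : List (String × Int)) (weights : List (String × String × Int)) : Decidable (Pre_bb_he graph start goal heuristic weights) := by unfold Pre_bb_he; infer_instance

def pvWitness_bb_he : (List (String × List String)) × String × String × (List (String × Int)) × (List (String × String × Int)) :=
  ([("a", ["b", "c"]), ("b", ["c"])], "a", "c", [("a", 3), ("b", 1), ("c", 0)], [("a", "b", 1), ("b", "c", 2), ("a", "c", 9)])

def Spec_bb_he (graph : List (String × List String)) (start : String) (goal : String) (heuristic : List (String × Int)) (weights : List (String × String × Int)) (out : Option (List String)) : Prop := out = bb_he_alt graph start goal heuristic weights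
instance (graph : List (String × List String)) (start : String) (goal : String) (heuristic : List (String × Int)) (weights : List (String × String × Int)) (out : Option (List String)) : Decidable (Spec_bb_he graph start goal heuristic weights out) := by unfold Spec_bb_he; infer_instance

-- ===== CLAIM (what is proved, stated in full; the proofs are below) =====
def Claim_equal_bb_he : Prop := ∀ (graph : List (String × List String)) (start : String) (goal : String) (heuristic : List (String × Int)) (weights : List (String × String × Int)), Dom_bb_he graph start goal heuristic weights → Pre_bb_he graph start goal heuristic weights → Spec_bb_he graph start goal heuristic weights (bb_he graph start goal heuristic weights)

-- ===== LEMMAS AND PROOFS =====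

theorem pvLt_irrefl (a : PVEntry) : pvLt a a = false := by
  simp [pvLt]

theorem pvLt_trans {a b c : PVEntry} (h1 : pvLt a b = true) (h2 : pvLt b c = true) :
    pvLt a c = true := by
  simp only [pvLt, decide_eq_true_iff] at *
  rcases h1 with h1 | ⟨e1, h1⟩ <;> rcases h2 with h2 | ⟨e2, h2⟩
  · exact Or.inl (lt_trans h1 h2)
  · exact Or.inl (e2 ▸ h1)
  · exact Or.inl (e1 ▸ h2)
  · refine Or.inr ⟨e1.trans e2, ?_⟩
    rcases h1 with h1 | ⟨f1, h1⟩ <;> rcases h2 with h2 | ⟨f2, h2⟩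
    · exact Or.inl (lt_trans h1 h2)
    · exact Or.inl (f2 ▸ h1)
    · exact Or.inl (f1 ▸ h2)
    · exact Or.inr ⟨f1.trans f2, lt_trans h1 h2⟩

theorem pvLt_asymm {a b : PVEntry} (h : pvLt a b = true) : pvLt b a = false := by
  by_contra hc
  have hba : pvLt b a = true := by
    cases hx : pvLt b a with
    | false => exact absurd hx hc
    | true => rfl
  have := pvLt_trans h hba
  rw [pvLt_irrefl] at this
  exact Bool.false_ne_true this

theorem pvLt_conn {a b : PVEntry} (h1 : pvLt a b = false) (h2 : pvLt b a = false) : a = b := by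
  simp only [pvLt, decide_eq_false_iff_not, not_or, not_and, not_lt] at h1 h2
  obtain ⟨a1, a2, a3⟩ := a
  obtain ⟨b1, b2, b3⟩ := b
  simp only at h1 h2 ⊢
  have e1 : a1 = b1 := le_antisymm h2.1 h1.1
  have h1' := h1.2 e1
  have h2' := h2.2 e1.symm
  have e2 : a2 = b2 := le_antisymm h2'.1 h1'.1
  have e3 : a3 = b3 := le_antisymm (h2'.2 e2.symm) (h1'.2 e2)
  simp [e1, e2, e3]

theorem pvLt_false_trans {a b c : PVEntry} (h1 : pvLt a b = false) (h2 : pvLt b c = false) :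
    pvLt a c = false := by
  cases hac : pvLt a c with
  | false => rfl
  | true =>
    by_cases hab : a = b
    · subst hab; simp [hac] at h2
    · have hba : pvLt b a = true := by
        cases hx : pvLt b a with
        | true => rfl
        | false => exact absurd (pvLt_conn h1 hx) hab
      have := pvLt_trans hba hac
      simp [this] at h2

theorem popMin_eq_none {pq : List PVEntry} : popMin pq = none ↔ pq = [] := by
  cases pq with
  | nil => simp [popMin]
  | cons e es =>
    simp only [popMin]
    cases popMin es with
    | none => simp
    | some p => obtain ⟨m, rest⟩ := p; by_cases h : pvLt m e = true <;> simp [h]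

theorem popMin_spec {pq : List PVEntry} {e : PVEntry} {rest : List PVEntry}
    (h : popMin pq = some (e, rest)) :
    e ∈ pq ∧ (∀ x ∈ pq, pvLt x e = false) ∧ rest = pq.erase e := by
  induction pq generalizing e rest with
  | nil => simp [popMin] at h
  | cons a as ih =>
    simp only [popMin] at h
    cases hm : popMin as with
    | none =>
      rw [hm] at h
      simp only [Option.some.injEq, Prod.mk.injEq] at h
      obtain ⟨rfl, rfl⟩ := h
      have has : as = [] := popMin_eq_none.mp hm
      subst has
      refine ⟨List.mem_cons_self, ?_, by simp⟩
      intro x hx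
      rcases List.mem_singleton.mp hx with rfl
      exact pvLt_irrefl _
    | some p =>
      obtain ⟨m, rest'⟩ := p
      rw [hm] at h
      obtain ⟨hmem, hmin, hrest⟩ := ih hm
      by_cases hlt : pvLt m a = true
      · simp only [hlt, if_pos] at h
        simp only [Option.some.injEq, Prod.mk.injEq] at h
        obtain ⟨rfl, rfl⟩ := h
        have hne : ¬ a = m := by
          intro hq; subst hq; simp [pvLt] at hlt
        refine ⟨List.mem_cons_of_mem _ hmem, ?_, ?_⟩
        · intro x hx
          rcases List.mem_cons.mp hx with rfl | hx
          · exact pvLt_asymm hlt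
          · exact hmin x hx
        · rw [hrest]
          simp [List.erase_cons_tail, hne]
      · have hlt' : pvLt m a = false := by
          cases hx : pvLt m a with
          | false => rfl
          | true => exact absurd hx hlt
        simp only [hlt', Bool.false_eq_true, if_false, Option.some.injEq, Prod.mk.injEq] at h
        obtain ⟨rfl, rfl⟩ := h
        refine ⟨List.mem_cons_self, ?_, by simp⟩
        intro x hx
        rcases List.mem_cons.mp hx with rfl | hx
        · exact pvLt_irrefl _
        · exact pvLt_false_trans (hmin x hx) hlt'

theorem pvSelMin_cons (e a : PVEntry) (as : List PVEntry) :
    pvSelMin e (a :: as) = pvSelMin (if pvLt a e then a else e) as := rfl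

theorem pvSelMin_spec (e : PVEntry) (l : List PVEntry) :
    pvSelMin e l ∈ e :: l ∧ ∀ x ∈ e :: l, pvLt x (pvSelMin e l) = false := by
  induction l generalizing e with
  | nil =>
    refine ⟨List.mem_cons_self, ?_⟩
    intro x hx
    rcases List.mem_singleton.mp hx with rfl
    exact pvLt_irrefl _
  | cons a as ih =>
    rw [pvSelMin_cons]
    by_cases h : pvLt a e = true
    · simp only [h, if_true]
      obtain ⟨hmem, hmin⟩ := ih a
      refine ⟨List.mem_cons_of_mem e hmem, ?_⟩
      intro x hx
      rcases List.mem_cons.mp hx with rfl | hx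
      · exact pvLt_false_trans (pvLt_asymm h) (hmin a List.mem_cons_self)
      · exact hmin x hx
    · have h' : pvLt a e = false := by
        cases hq : pvLt a e with
        | false => rfl
        | true => exact absurd hq h
      simp only [h', Bool.false_eq_true, if_false]
      obtain ⟨hmem, hmin⟩ := ih e
      constructor
      · rcases List.mem_cons.mp hmem with hq | hq
        · rw [hq]; exact List.mem_cons_self
        · exact List.mem_cons_of_mem _ (List.mem_cons_of_mem _ hq)
      · intro x hx
        rcases List.mem_cons.mp hx with rfl | hx
        · exact hmin x List.mem_cons_self
        · rcases List.mem_cons.mp hx with rfl | hx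
          · exact pvLt_false_trans h' (hmin e List.mem_cons_self)
          · exact hmin x (List.mem_cons_of_mem _ hx)

theorem loop_eq (graph : List (String × List String)) (goal : String)
    (heuristic : List (String × Int)) (weights : List (String × String × Int)) :
    ∀ (fuel : Nat) (pqA pqB : List PVEntry), pqA.Perm pqB →
      pvLoopA graph goal heuristic weights fuel pqA
        = pvLoopB graph goal heuristic weights fuel pqB := by
  intro fuel
  induction fuel with
  | zero => intro pqA pqB _; rfl
  | succ n ih =>
    intro pqA pqB hperm
    cases pqB with
    | nil =>
      have : pqA = [] := hperm.eq_nil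
      subst this
      rfl
    | cons f fs =>
      have hne : pqA ≠ [] := by
        intro h; subst h; exact (List.cons_ne_nil _ _) hperm.symm.eq_nil
      obtain ⟨⟨e, rest⟩, hpop⟩ : ∃ p, popMin pqA = some p := by
        cases hx : popMin pqA with
        | none => exact absurd (popMin_eq_none.mp hx) hne
        | some p => exact ⟨p, rfl⟩
      obtain ⟨hmem, hmin, hrest⟩ := popMin_spec hpop
      obtain ⟨hbmem, hbmin⟩ := pvSelMin_spec f fs
      -- the two selected minima are equal
      have heb : e = pvSelMin f fs := by
        have h1 : pvLt e (pvSelMin f fs) = false := hbmin e (hperm.mem_iff.mp hmem)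
        have h2 : pvLt (pvSelMin f fs) e = false := hmin _ (hperm.symm.mem_iff.mp hbmem)
        exact pvLt_conn h1 h2
      obtain ⟨e1, e2, e3⟩ := e
      simp only [pvLoopA, pvLoopB, hpop, ← heb, PySem.List.pyGet?_neg_one]
      cases hg : e3.getLast? with
      | none => rfl
      | some node =>
        by_cases hgoal : (node == goal) = true
        · simp [hgoal]
        · simp only [hgoal, if_neg, Bool.false_eq_true, not_false_iff]
          rw [PySem.List.foldl_append_if (p := fun nb => !e3.contains nb)
            (f := fun nb => (e2 + PySem.Dict.getD (PySem.Dict.mk (weights.map (fun w => ((w.1, w.2.1), w.2.2)))) (node, nb) 0 + PySem.Dict.getD (PySem.Dict.mk heuristic) nb 0,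
              e2 + PySem.Dict.getD (PySem.Dict.mk (weights.map (fun w => ((w.1, w.2.1), w.2.2)))) (node, nb) 0, e3 ++ [nb]))]
          apply ih
          apply List.Perm.append_right
          rw [hrest, heb]
          exact hperm.erase _

-- ===== VERDICT (by name: the statement is the Claim_ definition above) =====
theorem bb_he_spec : Claim_equal_bb_he := by
  intro graph start goal heuristic weights _ _
  unfold Spec_bb_he bb_he bb_he_alt
  cases PySem.Dict.get? (PySem.Dict.mk heuristic) start with
  | none => rfl
  | some h0 =>
    exact loop_eq graph goal heuristic weights (pvFuelBig graph) _ _ (List.Perm.refl _)
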